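-- pv_equiv track=rewrite | github.com/josevasconcelos2002/PL2025-A100763 | TPC2/tpc2.py | nr_obras_por_periodo
-- ===== SOURCE A (Python) =====
-- def nr_obras_por_periodo(obras_dic):
--     dic = {}
--     for obra in obras_dic.values():
--         periodo = obra.get("periodo", "").strip()
--         if periodo:
--             if periodo not in dic:
--                 dic[periodo] = 0
--             dic[periodo] += 1
--     return dic
-- ===== SOURCE B (Python) =====
-- def _tally(ps):
--     # recursive partition: peel off every copy of the first period, count by length difference
--     if not ps:
--         return {}
--     head = ps[0]
--     rest = [q for q in ps if q != head]
--     return {head: len(ps) - len(rest), **_tally(rest)}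
--
-- def nr_obras_por_periodo(obras_dic):
--     periodos = [p for p in (obra.get("periodo", "").strip() for obra in obras_dic.values()) if p]
--     return _tally(periodos)
-- ===== Notes on version B (the rewrite author's own statement) =====
-- stated objective: alternative
-- what changed: Replaces the single-pass hash-counter loop with a recursive partition: extract the non-empty stripped periods once, then repeatedly peel off all copies of the first period, obtaining its count as a length difference and recursing on the remainder (no dict accumulation, no per-element counter updates).
import Mathlib
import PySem

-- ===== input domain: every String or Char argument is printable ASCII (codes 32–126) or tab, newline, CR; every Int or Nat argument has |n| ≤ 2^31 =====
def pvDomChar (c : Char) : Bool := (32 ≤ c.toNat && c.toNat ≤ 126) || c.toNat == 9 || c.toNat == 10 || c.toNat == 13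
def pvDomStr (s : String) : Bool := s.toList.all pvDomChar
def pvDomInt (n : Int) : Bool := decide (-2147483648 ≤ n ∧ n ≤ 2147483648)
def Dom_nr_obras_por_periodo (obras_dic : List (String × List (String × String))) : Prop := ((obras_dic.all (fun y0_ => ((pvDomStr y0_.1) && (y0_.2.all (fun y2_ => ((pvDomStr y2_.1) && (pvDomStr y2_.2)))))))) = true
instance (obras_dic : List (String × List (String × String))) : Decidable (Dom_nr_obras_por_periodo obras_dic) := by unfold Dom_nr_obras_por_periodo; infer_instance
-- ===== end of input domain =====

-- B replaces the hash-counter loop with a recursive partition (peel off all copies of the first period,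
-- count by length difference); alternative decomposition, same return value.

-- ===== PORT A =====
def nr_obras_por_periodo (obras_dic : List (String × List (String × String))) : List (String × Int) :=
  let dic : PySem.Dict String Int :=
    (obras_dic.map (·.2)).foldl (fun dic obra =>
      let periodo := PySem.Str.strip (PySem.Dict.getD (PySem.Dict.mk obra) "periodo" "")
      if periodo != "" then
        let dic := if dic.contains periodo then dic else dic.insert periodo 0
        dic.modify periodo 0 (fun x => x + 1)
      else dic) PySem.Dict.empty
  dic.items

-- ===== PORT B =====
-- the '{head: …, **_tally(rest)}' merge is a cons: head never occurs among rest's keys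
def pvTally : List String → List (String × Int)
  | [] => []
  | p :: t =>
    let rest := (p :: t).filter (fun q => q != p)
    (p, ((p :: t).length : Int) - (rest.length : Int)) :: pvTally rest
termination_by l => l.length
decreasing_by
  simp only [List.filter_cons, bne_self_eq_false, List.length_cons]
  exact Nat.lt_succ_of_le (List.length_filter_le _ _)

def nr_obras_por_periodo_alt (obras_dic : List (String × List (String × String))) : List (String × Int) :=
  let periodos := ((obras_dic.map (·.2)).map
      (fun obra => PySem.Str.strip (PySem.Dict.getD (PySem.Dict.mk obra) "periodo" ""))).filter
      (fun p => p != "")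
  pvTally periodos

-- ===== PRECONDITION & SPEC =====
def Spec_nr_obras_por_periodo (obras_dic : List (String × List (String × String))) (out : List (String × Int)) : Prop := out = nr_obras_por_periodo_alt obras_dic
instance (obras_dic : List (String × List (String × String))) (out : List (String × Int)) : Decidable (Spec_nr_obras_por_periodo obras_dic out) := by unfold Spec_nr_obras_por_periodo; infer_instance

-- ===== CLAIM =====
def Claim_equal_nr_obras_por_periodo : Prop := ∀ (obras_dic : List (String × List (String × String))), Dom_nr_obras_por_periodo obras_dic → Spec_nr_obras_por_periodo obras_dic (nr_obras_por_periodo obras_dic)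

-- ===== LEMMAS AND PROOFS =====

-- A's per-element step (ensure key, then += 1) is exactly the Counter bump.
lemma stepA_eq_modify (d : PySem.Dict String Int) (p : String) :
    (if d.contains p then d else d.insert p 0).modify p 0 (fun x => x + 1)
      = d.modify p 0 (fun x => x + 1) := by
  by_cases h : d.contains p
  · simp [h]
  · have h' : d.contains p = false := by simpa using h
    simp [PySem.Dict.modify, h', PySem.Dict.getD_insert_self,
      PySem.Dict.insert_insert_self, PySem.Dict.getD_of_not_contains]

-- Fusing A's loop: filtering/mapping first, then bumping, is the same fold.
lemma foldA_eq (xs : List (List (String × String))) :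
    ∀ d : PySem.Dict String Int,
    xs.foldl (fun dic obra =>
      let periodo := PySem.Str.strip (PySem.Dict.getD (PySem.Dict.mk obra) "periodo" "")
      if periodo != "" then
        let dic := if dic.contains periodo then dic else dic.insert periodo 0
        dic.modify periodo 0 (fun x => x + 1)
      else dic) d
    = ((xs.map (fun obra => PySem.Str.strip (PySem.Dict.getD (PySem.Dict.mk obra) "periodo" ""))).filter
        (fun p => p != "")).foldl (fun d x => d.modify x 0 (fun x => x + 1)) d := by
  induction xs with
  | nil => intro d; rfl
  | cons o rest ih =>
    intro d
    rw [List.foldl_cons, ih]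
    simp only [List.map_cons, List.filter_cons]
    by_cases h : (PySem.Str.strip (PySem.Dict.getD (PySem.Dict.mk o) "periodo" "") != "") = true
    · simp [h, stepA_eq_modify]
    · simp [h]

-- set(xs) commutes with filtering out one element.
lemma ofList_filter_ne (x : String) (t : List String) :
    PySem.Set.ofList (t.filter (fun y => !(y == x)))
      = (PySem.Set.ofList t).filter (fun y => !(y == x)) := by
  induction t with
  | nil => rfl
  | cons a t ih =>
    by_cases h : (a == x) = true
    · have hx : a = x := by simpa using h
      subst hx
      rw [List.filter_cons_of_neg (by simp), ih, PySem.Set.ofList_cons]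
      simp only [PySem.Set.discard]
      rw [List.filter_cons_of_neg (by simp), List.filter_filter]
      exact (List.filter_congr (fun y _ => by cases hy : y == a <;> simp)).symm
    · have h' : (a == x) = false := by simpa using h
      rw [List.filter_cons_of_pos (by simp [h']), PySem.Set.ofList_cons, PySem.Set.ofList_cons,
        ih]
      simp only [PySem.Set.discard]
      rw [List.filter_cons_of_pos (by simp [h']), List.filter_comm]

-- splitting a list by a predicate preserves total length
lemma filter_split (t : List String) (pq : String → Bool) :
    (t.filter pq).length + (t.filter (fun q => !pq q)).length = t.length := by
  induction t with
  | nil => rfl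
  | cons a t ih =>
    by_cases h : pq a = true <;> simp [h, ← ih] <;> omega

-- B's recursive partition produces Counter(l) in first-occurrence order.
lemma pvTally_eq (n : Nat) : ∀ l : List String, l.length ≤ n →
    pvTally l = (PySem.Set.ofList l).map (fun k => (k, (l.count k : Int))) := by
  induction n with
  | zero =>
    intro l hl
    have : l = [] := List.eq_nil_of_length_eq_zero (Nat.le_zero.mp hl)
    subst this; simp [pvTally]
  | succ n ih =>
    intro l hl
    match l with
    | [] => simp [pvTally]
    | p :: t =>
      rw [pvTally]
      have hrest : (p :: t).filter (fun q => q != p) = t.filter (fun q => !(q == p)) := by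
        simp [bne]
      have hlen : (t.filter (fun q => !(q == p))).length ≤ n := by
        have := List.length_filter_le (fun q => !(q == p)) t
        simp only [List.length_cons, Nat.succ_le_succ_iff] at hl
        omega
      rw [hrest, ih _ hlen]
      rw [PySem.Set.ofList_cons]
      simp only [PySem.Set.discard, ← ofList_filter_ne, List.map_cons]
      congr 1
      · -- head entry: count p (p::t) = (len (p::t)) - (len rest)
        have h1 : (p :: t).count p + (t.filter (fun q => !(q == p))).length
            = (p :: t).length := by
          have hs := filter_split t (fun q => (q == p))
          have hc : t.count p = (t.filter (fun q => (q == p))).length := by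
            simp [List.count_eq_length_filter]
          simp only [List.count_cons_self, List.length_cons]
          omega
        simp only [Prod.mk.injEq]
        refine ⟨trivial, ?_⟩
        omega
      · -- remaining entries: counts are unchanged by removing p
        apply List.map_congr_left
        intro k hk
        have hkmem : k ∈ t.filter (fun q => !(q == p)) := by
          have := (PySem.Set.mem_ofList (xs := t.filter (fun q => !(q == p))) (y := k)).mp hk
          exact this
        have hkne : (k == p) = false := by
          have := List.of_mem_filter hkmem
          simpa using this
        have hkne' : k ≠ p := by simpa using hkne
        have hpk : ¬ p = k := fun h => hkne' h.symm
        rw [List.count_filter (by simp [hkne'])]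
        simp [hpk]

-- ===== VERDICT =====
theorem nr_obras_por_periodo_spec : Claim_equal_nr_obras_por_periodo := by
  intro obras_dic _
  unfold Spec_nr_obras_por_periodo nr_obras_por_periodo nr_obras_por_periodo_alt
  rw [foldA_eq]
  rw [show ∀ l : List String, l.foldl (fun d x => d.modify x 0 (fun x => x + 1)) PySem.Dict.empty
        = PySem.Dict.counter l from fun _ => rfl]
  rw [PySem.Dict.items_counter]
  rw [pvTally_eq (n := _) _ (Nat.le_refl _)]
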